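-- pv_equiv track=rewrite | github.com/enverfakhan/cmpe493_project | codes/basics.py | lemmatizer
-- ===== SOURCE A (Python) =====
-- def lemmatizer(vocab_index, vocab):
--
--     # find the oov words
--     oov = []
--     voc = []
--     for key in vocab_index.keys():
--         try:
--             _ = vocab[key]
--             voc.append(key)
--         except:
--             oov.append(key)
--             # poorly lemmatize them and look if they are present in the vocab
--     lemmatized = []
--     doub_exc_new = []
--     for word in oov:
--         flag = False
--         for i in range(len(word)):
--             i += 1
--             lem = word[:-i]
--             if lem in vocab:
--                 lemmatized.append((word, lem, i))
--                 flag = True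
--                 break
--         if flag is False:
--             doub_exc_new.append(word)
--     return lemmatized, doub_exc_new, oov, voc
-- ===== SOURCE B (Python) =====
-- def lemmatizer(vocab_index, vocab):
--     # Build a trie of vocab keys; a node is a dict char -> child, with key '' marking "word ends here".
--     root = {}
--     for k in vocab:
--         node = root
--         for ch in k:
--             node = node.setdefault(ch, {})
--         node[''] = True
--     lemmatized = []
--     doub_exc_new = []
--     oov = []
--     voc = []
--     # One walk per key: classify it and find its longest proper prefix in vocab at the same time.
--     for word in vocab_index:
--         node = root
--         best = -1          # deepest proper-prefix depth that is a vocab word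
--         depth = 0
--         for ch in word:
--             if '' in node:
--                 best = depth
--             node = node.get(ch)
--             if node is None:
--                 break
--             depth += 1
--         if node is not None and depth == len(word) and '' in node:
--             voc.append(word)
--         else:
--             oov.append(word)
--             if best >= 0:
--                 lemmatized.append((word, word[:best], len(word) - best))
--             else:
--                 doub_exc_new.append(word)
--     return lemmatized, doub_exc_new, oov, voc
-- ===== Notes on version B (the rewrite author's own statement) =====
-- stated objective: alternative
-- what changed: B builds a trie of the vocab keys and does a single trie walk per vocab_index key that simultaneously classifies it (in-vocab vs OOV) and finds the longest in-vocab proper prefix, replacing A's two passes with a descending per-word prefix-hash scan.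
import Mathlib
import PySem

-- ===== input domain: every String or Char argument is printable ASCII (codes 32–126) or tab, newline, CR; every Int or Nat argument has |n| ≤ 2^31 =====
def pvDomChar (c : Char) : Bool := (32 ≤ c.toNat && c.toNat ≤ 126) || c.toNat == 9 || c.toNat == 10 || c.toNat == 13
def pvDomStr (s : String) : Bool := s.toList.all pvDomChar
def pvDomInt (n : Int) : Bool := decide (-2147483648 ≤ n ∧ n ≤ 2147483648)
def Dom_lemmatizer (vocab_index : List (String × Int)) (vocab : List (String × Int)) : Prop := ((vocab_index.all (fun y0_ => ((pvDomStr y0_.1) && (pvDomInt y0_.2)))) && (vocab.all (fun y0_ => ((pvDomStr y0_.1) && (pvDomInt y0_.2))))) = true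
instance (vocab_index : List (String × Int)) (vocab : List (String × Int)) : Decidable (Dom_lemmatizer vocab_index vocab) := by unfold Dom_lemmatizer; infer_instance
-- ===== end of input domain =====

-- B replaces A's two passes (try/except classification + descending prefix scan per OOV word)
-- by one trie of the vocab keys and a single walk per key that classifies it and finds the
-- longest in-vocab proper prefix at once (a different algorithm of similar cost).


-- ===== PORT A =====
-- inner loop of A: for i in range(len(word)): i += 1; lem = word[:-i]; if lem in vocab: return (lem, i)
-- (for 1 ≤ i ≤ len(word), word[:-i] is exactly the first len(word)-i characters)
def scanA (vkeys : List String) (w : List Char) (i : Nat) : Option (List Char × Nat) :=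
  if i < w.length then
    let i' := i + 1
    let lem := w.take (w.length - i')
    if String.ofList lem ∈ vkeys then some (lem, i') else scanA vkeys w i'
  else none
termination_by w.length - i

def lemmatizer (vocab_index : List (String × Int)) (vocab : List (String × Int)) : (List (String × String × Int)) × List String × List String × List String :=
  -- `key in vocab` / the try: vocab[key] succeeds exactly when key is among vocab's keys
  let vkeys := vocab.map (·.1)
  -- first loop: over vocab_index.keys() (insertion order, first occurrence)
  let ov := (PySem.List.dedup (vocab_index.map (·.1))).foldl
    (fun (p : List String × List String) key =>
      if key ∈ vkeys then (p.1, p.2 ++ [key]) else (p.1 ++ [key], p.2)) ([], [])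
  -- second loop: over oov
  let ld := ov.1.foldl
    (fun (p : List (String × String × Int) × List String) word =>
      match scanA vkeys word.toList 0 with
      | some (lem, i) => (p.1 ++ [(word, String.ofList lem, (i : Int))], p.2)
      | none => (p.1, p.2 ++ [word])) ([], [])
  (ld.1, ld.2, ov.1, ov.2)

-- ===== PORT B =====
-- trie node = (terminal flag, children); explicit child list (no nested inductive)
mutual
inductive PTrie : Type where
  | node : Bool → PChildren → PTrie
inductive PChildren : Type where
  | nil : PChildren
  | cons : Char → PTrie → PChildren → PChildren
end

def childGet : PChildren → Char → Option PTrie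
  | .nil, _ => none
  | .cons c t rest, d => if d = c then some t else childGet rest d

def childSet : PChildren → Char → PTrie → PChildren
  | .nil, c, t => .cons c t .nil
  | .cons e s rest, c, t => if e = c then .cons c t rest else .cons e s (childSet rest c t)

-- B's "node = node.setdefault(ch, {})" walk, as the obvious recursion on the key
def trieInsert : PTrie → List Char → PTrie
  | .node _ ch, [] => .node true ch
  | .node b ch, c :: rest =>
    let sub := (childGet ch c).getD (.node false .nil)
    .node b (childSet ch c (trieInsert sub rest))

-- B's per-word walk; best = -1 sentinel is ported as Option Nat (none = -1);
-- reaching [] means depth == len(word) with node not None, so full-match = terminal flag there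
def walk : PTrie → List Char → Option Nat → Nat → Option Nat × Bool
  | .node t _, [], best, _ => (best, t)
  | .node t ch, c :: rest, best, depth =>
    let best' := if t then some depth else best
    match childGet ch c with
    | none => (best', false)
    | some s => walk s rest best' (depth + 1)

def lemmatizer_alt (vocab_index : List (String × Int)) (vocab : List (String × Int)) : (List (String × String × Int)) × List String × List String × List String :=
  -- for k in vocab: insert k into the trie (dict iteration = dedup'd keys)
  let root := (PySem.List.dedup (vocab.map (·.1))).foldl
    (fun t k => trieInsert t k.toList) (.node false .nil)
  -- for word in vocab_index: one walk classifies and lemmatizes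
  (PySem.List.dedup (vocab_index.map (·.1))).foldl
    (fun (p : List (String × String × Int) × List String × List String × List String) word =>
      let r := walk root word.toList none 0
      if r.2 then (p.1, p.2.1, p.2.2.1, p.2.2.2 ++ [word])
      else match r.1 with
        | some b => (p.1 ++ [(word, String.ofList (word.toList.take b), ((word.toList.length - b : Nat) : Int))], p.2.1, p.2.2.1 ++ [word], p.2.2.2)
        | none => (p.1, p.2.1 ++ [word], p.2.2.1 ++ [word], p.2.2.2))
    ([], [], [], [])

-- ===== PRECONDITION & SPEC =====
def Spec_lemmatizer (vocab_index : List (String × Int)) (vocab : List (String × Int)) (out : (List (String × String × Int)) × List String × List String × List String) : Prop := out = lemmatizer_alt vocab_index vocab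
instance (vocab_index : List (String × Int)) (vocab : List (String × Int)) (out : (List (String × String × Int)) × List String × List String × List String) : Decidable (Spec_lemmatizer vocab_index vocab out) := by unfold Spec_lemmatizer; infer_instance

-- ===== CLAIM (what is proved, stated in full; the proofs are below) =====
def Claim_equal_lemmatizer : Prop := ∀ (vocab_index : List (String × Int)) (vocab : List (String × Int)), Dom_lemmatizer vocab_index vocab → Spec_lemmatizer vocab_index vocab (lemmatizer vocab_index vocab)

-- ===== LEMMAS AND PROOFS =====

-- trie membership (proof-side characterisation of the walk's full-match component)
def memT : PTrie → List Char → Bool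
  | .node t _, [] => t
  | .node _ ch, c :: r =>
    match childGet ch c with
    | none => false
    | some s => memT s r

-- "first hit scanning p = n-1, n-2, …, 0"
def bestRec (f : Nat → Bool) : Nat → Option Nat
  | 0 => none
  | n + 1 => if f n then some n else bestRec f n

lemma childGet_childSet (ch : PChildren) (c : Char) (t : PTrie) (d : Char) :
    childGet (childSet ch c t) d = if d = c then some t else childGet ch d := by
  match ch with
  | .nil => simp [childSet, childGet]
  | .cons e s rest =>
    have ih := childGet_childSet rest c t d
    by_cases hec : e = c <;> by_cases hde : d = e <;>
      simp_all [childSet, childGet]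

lemma memT_empty (u : List Char) : memT (.node false .nil) u = false := by
  cases u with
  | nil => rfl
  | cons c r => simp [memT, childGet]


lemma memT_insert (k : List Char) : ∀ (b : Bool) (ch : PChildren) (u : List Char),
    memT (trieInsert (.node b ch) k) u = (decide (u = k) || memT (.node b ch) u) := by
  induction k with
  | nil =>
    intro b ch u
    cases u with
    | nil => simp [trieInsert, memT]
    | cons c r => simp [trieInsert, memT]
  | cons c kr ih =>
    intro b ch u
    cases u with
    | nil => simp [trieInsert, memT]
    | cons d ur =>
      simp only [trieInsert, memT, childGet_childSet]
      by_cases hdc : d = c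
      · subst hdc
        cases hg : childGet ch d with
        | none => simp [memT_empty, ih]
        | some s => cases s with | node sb sch => simp [ih]
      · simp [hdc]


lemma memT_foldl (ks : List String) : ∀ (t : PTrie) (u : List Char),
    memT (ks.foldl (fun t k => trieInsert t k.toList) t) u
      = (ks.any (fun k => k.toList = u) || memT t u) := by
  induction ks with
  | nil => intro t u; simp
  | cons k ks ih =>
    intro t u
    cases t with
    | node tb tch =>
      rw [List.foldl_cons, ih, memT_insert]
      simp only [List.any_cons]
      cases h : decide (u = k.toList) <;>
        simp [eq_comm, h, Bool.or_comm] at *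

lemma walk_snd (w : List Char) : ∀ (t : PTrie) (b : Option Nat) (d : Nat),
    (walk t w b d).2 = memT t w := by
  induction w with
  | nil => intro t b d; cases t; rfl
  | cons c rest ih =>
    intro t b d
    cases t with
    | node tb ch =>
      simp only [walk, memT]
      cases childGet ch c with
      | none => rfl
      | some s => exact ih s _ _


lemma bestRec_congr (f g : Nat → Bool) (h : ∀ p, f p = g p) (n : Nat) :
    bestRec f n = bestRec g n := by
  induction n with
  | zero => rfl
  | succ n ih => simp [bestRec, h n, ih]


lemma bestRec_shift (f : Nat → Bool) (n : Nat) :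
    bestRec f (n + 1)
      = match bestRec (fun p => f (p + 1)) n with
        | some p => some (p + 1)
        | none => if f 0 then some 0 else none := by
  induction n with
  | zero => simp [bestRec]
  | succ n ih =>
    simp only [bestRec] at *
    by_cases hf : f (n + 1)
    · simp [hf]
    · simp [hf, ih]


lemma bestRec_false (n : Nat) : bestRec (fun _ => false) n = none := by
  induction n with
  | zero => rfl
  | succ n ih => simp [bestRec, ih]


lemma walk_fst (w : List Char) : ∀ (t : PTrie) (b : Option Nat) (d : Nat),
    (walk t w b d).1
      = match bestRec (fun p => memT t (w.take p)) w.length with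
        | some p => some (d + p)
        | none => b := by
  induction w with
  | nil => intro t b d; cases t; simp [walk, bestRec]
  | cons c rest ih =>
    intro t b d
    cases t with
    | node tb ch =>
      rw [show ((c :: rest).length) = rest.length + 1 from rfl,
          bestRec_shift]
      have htake0 : memT (PTrie.node tb ch) ((c :: rest).take 0) = tb := rfl
      cases hg : childGet ch c with
      | none =>
        have hall : ∀ p, memT (PTrie.node tb ch) ((c :: rest).take (p + 1)) = false := by
          intro p; simp [List.take, memT, hg]
        rw [bestRec_congr _ (fun _ => false) hall, bestRec_false]
        simp only [walk, hg, htake0]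
        cases tb <;> simp
      | some s =>
        have hsh : ∀ p, memT (PTrie.node tb ch) ((c :: rest).take (p + 1)) = memT s (rest.take p) := by
          intro p; simp [List.take, memT, hg]
        rw [bestRec_congr _ (fun p => memT s (rest.take p)) hsh]
        simp only [walk, hg]
        rw [ih s (if tb then some d else b) (d + 1)]
        cases hb : bestRec (fun p => memT s (rest.take p)) rest.length with
        | some p => simp [Nat.add_assoc, Nat.add_comm 1 p]
        | none => cases tb <;> simp [memT]


lemma scanA_eq (vkeys : List String) (w : List Char) : ∀ (n i : Nat), n = w.length - i →
    scanA vkeys w i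
      = (bestRec (fun p => decide (String.ofList (w.take p) ∈ vkeys)) n).map
          (fun p => (w.take p, w.length - p)) := by
  intro n
  induction n with
  | zero =>
    intro i h
    rw [scanA]
    have : ¬ i < w.length := by omega
    simp [this, bestRec]
  | succ n ih =>
    intro i h
    rw [scanA]
    have hi : i < w.length := by omega
    have hn : w.length - (i + 1) = n := by omega
    simp only [hi, if_true, hn, bestRec]
    by_cases hm : String.ofList (w.take n) ∈ vkeys
    · simp [hm]
      omega
    · simp [hm]
      exact ih (i + 1) (by omega)


lemma memT_root (vkeys : List String) (u : List Char) :
    memT ((PySem.List.dedup vkeys).foldl (fun t k => trieInsert t k.toList) (.node false .nil)) u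
      = decide (String.ofList u ∈ vkeys) := by
  rw [memT_foldl, memT_empty]
  simp only [Bool.or_false]
  by_cases h : String.ofList u ∈ vkeys
  · simp only [h, decide_true, List.any_eq_true]
    exact ⟨String.ofList u, (PySem.List.mem_dedup _ _).mpr h, by simp [String.toList_ofList]⟩
  · simp only [h, decide_false, List.any_eq_false]
    intro k hk
    simp only [decide_eq_true_eq]
    intro hku
    have hk2 : k ∈ vkeys := (PySem.List.mem_dedup _ _).mp hk
    have : k = String.ofList u := String.toList_inj.mp (by simp [String.toList_ofList, hku])
    exact h (this ▸ hk2)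

lemma scanA_walk (vkeys : List String) (root : PTrie)
    (hmem : ∀ u : List Char, memT root u = decide (String.ofList u ∈ vkeys)) (w : String) :
    scanA vkeys w.toList 0
      = ((walk root w.toList none 0).1).map (fun p => (w.toList.take p, w.toList.length - p)) := by
  rw [walk_fst,
      scanA_eq vkeys w.toList w.toList.length 0 (by omega),
      bestRec_congr (fun p => decide (String.ofList (w.toList.take p) ∈ vkeys))
        (fun p => memT root (w.toList.take p)) (fun p => (hmem _).symm)]
  cases bestRec (fun p => memT root (w.toList.take p)) w.toList.length with
  | none => simp
  | some p => simp

lemma cls_fold (vkeys : List String) (L : List String) : ∀ (o v : List String),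
    L.foldl (fun (p : List String × List String) key =>
        if key ∈ vkeys then (p.1, p.2 ++ [key]) else (p.1 ++ [key], p.2)) (o, v)
      = (o ++ L.filter (fun k => !decide (k ∈ vkeys)), v ++ L.filter (fun k => decide (k ∈ vkeys))) := by
  induction L with
  | nil => intro o v; simp
  | cons w L ih =>
    intro o v
    by_cases h : w ∈ vkeys <;> simp [h, ih]

lemma fuse (vkeys : List String) (root : PTrie)
    (hfull : ∀ w : String, (walk root w.toList none 0).2 = decide (w ∈ vkeys))
    (hbest : ∀ w : String, scanA vkeys w.toList 0
        = ((walk root w.toList none 0).1).map (fun p => (w.toList.take p, w.toList.length - p)))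
    (L : List String) :
    ∀ (lems : List (String × String × Int)) (doub oov voc : List String),
    L.foldl (fun (p : List (String × String × Int) × List String × List String × List String) word =>
        let r := walk root word.toList none 0
        if r.2 then (p.1, p.2.1, p.2.2.1, p.2.2.2 ++ [word])
        else match r.1 with
          | some b => (p.1 ++ [(word, String.ofList (word.toList.take b), ((word.toList.length - b : Nat) : Int))], p.2.1, p.2.2.1 ++ [word], p.2.2.2)
          | none => (p.1, p.2.1 ++ [word], p.2.2.1 ++ [word], p.2.2.2))
      (lems, doub, oov, voc)
    = (((L.filter (fun k => !decide (k ∈ vkeys))).foldl (fun (p : List (String × String × Int) × List String) word =>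
          match scanA vkeys word.toList 0 with
          | some (lem, i) => (p.1 ++ [(word, String.ofList lem, (i : Int))], p.2)
          | none => (p.1, p.2 ++ [word])) (lems, doub)).1,
       ((L.filter (fun k => !decide (k ∈ vkeys))).foldl (fun (p : List (String × String × Int) × List String) word =>
          match scanA vkeys word.toList 0 with
          | some (lem, i) => (p.1 ++ [(word, String.ofList lem, (i : Int))], p.2)
          | none => (p.1, p.2 ++ [word])) (lems, doub)).2,
       oov ++ L.filter (fun k => !decide (k ∈ vkeys)),
       voc ++ L.filter (fun k => decide (k ∈ vkeys))) := by
  induction L with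
  | nil => intro lems doub oov voc; simp
  | cons w L ih =>
    intro lems doub oov voc
    simp only [List.foldl_cons, List.filter_cons]
    by_cases h : w ∈ vkeys
    · simp only [h, decide_true, Bool.not_true, hfull w, if_true, ih]
      simp
    · simp only [h, decide_false, Bool.not_false, if_true, hfull w, Bool.false_eq_true, if_false, hbest w,
        List.foldl_cons]
      cases hw : (walk root w.toList none 0).1 with
      | none => simp only [Option.map_none, ih]; simp
      | some p => simp only [Option.map_some, ih]; simp

-- ===== VERDICT (by name: the statement is the Claim_ definition above) =====
theorem lemmatizer_spec : Claim_equal_lemmatizer := by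
  intro vocab_index vocab _
  unfold Spec_lemmatizer
  simp only [lemmatizer, lemmatizer_alt]
  rw [cls_fold (vocab.map (·.1)) (PySem.List.dedup (vocab_index.map (·.1))) [] []]
  rw [fuse (vocab.map (·.1)) _
        (fun w => by rw [walk_snd, memT_root]; simp [String.ofList_toList])
        (fun w => scanA_walk _ _ (fun u => memT_root _ u) w)]
  simp
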